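-- pv_equiv track=rewrite | github.com/drdubel/cwiczenia | logia/Szyfr_kolumnowy.py | zamiana_klucza
-- ===== SOURCE A (Python) =====
-- def zamiana_klucza(klucz):
--     alfabet = 'abcdefghijklmnopqrstuvwxyz'
--     kolejnosc = ''
--     klucz_posortowany = sorted(klucz)
--     i = 0
--     for lit in klucz:
--         polozenie = klucz_posortowany.index(lit) + klucz[:i].count(lit)
--         kolejnosc = kolejnosc + str(polozenie)
--         i += 1
--     return kolejnosc
-- ===== SOURCE B (Python) =====
-- def zamiana_klucza(klucz):
--     # Count each character once, then rank = (#chars smaller) + (#equal chars seen so far):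
--     # no sorting of the whole key and no repeated .index / slice scans.
--     cnt = {}
--     for c in klucz:
--         cnt[c] = cnt.get(c, 0) + 1
--     less = {}
--     for c in cnt:
--         less[c] = sum(v for d, v in cnt.items() if d < c)
--     seen = {}
--     kolejnosc = ''
--     for c in klucz:
--         k = seen.get(c, 0)
--         seen[c] = k + 1
--         kolejnosc += str(less[c] + k)
--     return kolejnosc
-- ===== Notes on version B (the rewrite author's own statement) =====
-- stated objective: faster
-- what changed: B never sorts and never rescans: one pass counts character multiplicities, a table over the distinct characters gives each char the number of strictly smaller characters, and a running seen-counter replaces A's per-position sorted.index() and klucz[:i].count() scans.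
import Mathlib
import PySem

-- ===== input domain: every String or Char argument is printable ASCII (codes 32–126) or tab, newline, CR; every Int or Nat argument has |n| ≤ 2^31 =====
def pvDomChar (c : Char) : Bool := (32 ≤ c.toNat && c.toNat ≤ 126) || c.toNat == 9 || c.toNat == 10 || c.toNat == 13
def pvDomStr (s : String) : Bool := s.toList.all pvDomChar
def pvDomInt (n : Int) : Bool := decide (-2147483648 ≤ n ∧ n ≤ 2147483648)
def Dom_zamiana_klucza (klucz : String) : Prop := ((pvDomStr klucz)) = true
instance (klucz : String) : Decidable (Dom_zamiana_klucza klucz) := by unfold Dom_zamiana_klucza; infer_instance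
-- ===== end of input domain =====

-- B replaces A's sort + per-character .index/slice scans by one counting pass plus a
-- smaller-than table over the distinct characters (objective: faster).

-- ===== PORT A =====
-- A: sorts the key, then for each char: rank = sorted.index(lit) + klucz[:i].count(lit).
-- 'klucz_posortowany.index(lit)' can never raise (lit comes from klucz, which the sorted
-- list permutes), so the `.getD 0` default below is unreachable; '.count(lit)' has a
-- SINGLE-character needle, ported exactly as PySem.Chars.count with [lit].
def zamiana_klucza (klucz : String) : String :=
  -- let alfabet := "abcdefghijklmnopqrstuvwxyz"  (bound but unused in A)
  let cs := klucz.toList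
  let klucz_posortowany := PySem.List.sorted cs (fun c => c)
  let r := cs.foldl (fun (st : List Char × Int) lit =>
      let polozenie : Int :=
        (((PySem.List.index? klucz_posortowany lit).getD 0 : Nat) : Int)
          + ((PySem.Chars.count (PySem.List.slice cs none (some st.2)) [lit] : Nat) : Int)
      (st.1 ++ (PySem.Int.toStr polozenie).toList, st.2 + 1)) ([], 0)
  String.ofList r.1

-- ===== PORT B =====
-- cnt = {}; for c in klucz: cnt[c] = cnt.get(c, 0) + 1
def pvCnt (cs : List Char) : PySem.Dict Char Int :=
  cs.foldl (fun d c => d.insert c (d.getD c 0 + 1)) PySem.Dict.empty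

-- less = {}; for c in cnt: less[c] = sum(v for d, v in cnt.items() if d < c)
def pvLess (cs : List Char) : PySem.Dict Char Int :=
  (pvCnt cs).keys.foldl (fun d c =>
    d.insert c (((pvCnt cs).items.filter (fun p => decide (p.1 < c))).map (fun p => p.2)).sum)
    PySem.Dict.empty


-- 'less[c]' in B's last loop never raises (every char of klucz is a key of cnt, hence of
-- less), so the `.getD 0` default is unreachable.
def zamiana_klucza_alt (klucz : String) : String :=
  let cs := klucz.toList
  let less := pvLess cs
  let r := cs.foldl (fun (st : PySem.Dict Char Int × List Char) c =>
      let k := st.1.getD c 0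
      (st.1.insert c (k + 1), st.2 ++ (PySem.Int.toStr (less.getD c 0 + k)).toList))
    (PySem.Dict.empty, [])
  String.ofList r.2

-- ===== PRECONDITION & SPEC =====
-- A raises on no input (the .index argument is always present), so there is no Pre_.
def Spec_zamiana_klucza (klucz : String) (out : String) : Prop := out = zamiana_klucza_alt klucz
instance (klucz : String) (out : String) : Decidable (Spec_zamiana_klucza klucz out) := by unfold Spec_zamiana_klucza; infer_instance

-- ===== CLAIM (what is proved, stated in full; the proofs are below) =====
def Claim_equal_zamiana_klucza : Prop := ∀ (klucz : String), Dom_zamiana_klucza klucz → Spec_zamiana_klucza klucz (zamiana_klucza klucz)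

-- ===== LEMMAS AND PROOFS =====

lemma count_go_singleton (c : Char) :
    ∀ (l : List Char) (fuel acc : Nat), l.length ≤ fuel →
      PySem.Chars.count.go [c] fuel l acc = acc + l.count c := by
  intro l
  induction l with
  | nil => intro fuel acc _; cases fuel <;> simp [PySem.Chars.count.go]
  | cons x t ih =>
      intro fuel acc hle
      cases fuel with
      | zero => exact absurd hle (by simp)
      | succ f =>
          have hle' : t.length ≤ f := by simpa using hle
          by_cases hx : x = c
          · subst hx
            have hpre : ([x].isPrefixOf (x :: t)) = true := by simp [List.isPrefixOf]
            simp only [PySem.Chars.count.go, hpre, if_true]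
            rw [show List.drop (List.length [x]) (x :: t) = t by simp]
            rw [ih f (acc + 1) hle']
            rw [List.count_cons_self]
            omega
          · have hpre : ([c].isPrefixOf (x :: t)) = false := by
              simp [List.isPrefixOf]
              exact fun h => hx h.symm
            simp only [PySem.Chars.count.go, hpre, Bool.false_eq_true, if_false]
            rw [ih f acc hle']; simp [List.count_cons]; exact hx

lemma count_singleton (c : Char) (l : List Char) :
    PySem.Chars.count l [c] = l.count c := by
  simp only [PySem.Chars.count]
  rw [if_neg (by simp)]
  rw [count_go_singleton c l l.length 0 le_rfl]
  simp

lemma index?_sorted_eq_countP (c : Char) :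
    ∀ (l : List Char), l.Pairwise (· ≤ ·) → c ∈ l →
      PySem.List.index? l c = some (l.countP (fun x => decide (x < c))) := by
  intro l
  induction l with
  | nil => intro _ h; simp at h
  | cons x t ih =>
      intro hp hm
      have hx : ∀ y ∈ t, x ≤ y := (List.pairwise_cons.mp hp).1
      have ht : t.Pairwise (· ≤ ·) := (List.pairwise_cons.mp hp).2
      by_cases hxc : x = c
      · subst hxc
        rw [PySem.List.index?_cons_self]
        have h0 : (x :: t).countP (fun y => decide (y < x)) = 0 := by
          rw [List.countP_eq_zero]
          intro y hy
          rcases List.mem_cons.mp hy with h | h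
          · simp [h]
          · simpa using not_lt.mpr (hx y h)
        rw [h0]
      · have hm' : c ∈ t := by
          rcases List.mem_cons.mp hm with h | h
          · exact absurd h.symm hxc
          · exact h
        rw [PySem.List.index?_cons_of_ne t hxc, ih ht hm']
        have hlt : x < c := lt_of_le_of_ne (hx c hm') hxc
        simp [hlt]

lemma sum_count (p : Char → Bool) (ds : List Char) (hnd : ds.Nodup) :
    ∀ (xs : List Char), (∀ x ∈ xs, p x = true → x ∈ ds) →
      ((ds.filter p).map (fun k => (xs.count k : Int))).sum = (xs.countP p : Int) := by
  intro xs
  induction xs with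
  | nil => intro _; simp
  | cons x xs ih =>
      intro hcov
      have hstep : ((ds.filter p).map (fun k => ((x :: xs).count k : Int))).sum
          = ((ds.filter p).map (fun k => (xs.count k : Int))).sum
            + ((ds.filter p).map (fun k => if (k == x) = true then (1 : Int) else 0)).sum := by
        rw [← PySem.List.sum_map_add_int]
        congr 1
        apply List.map_congr_left
        intro k _
        rw [List.count_cons]
        push_cast
        split_ifs <;> simp_all [beq_iff_eq]
      rw [hstep, ih (fun y hy hp => hcov y (List.mem_cons_of_mem _ hy) hp)]
      rw [PySem.List.sum_map_ite_one_zero]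
      have hcnt : (ds.filter p).countP (fun k => k == x) = (ds.filter p).count x := by
        simp [List.count]
      rw [hcnt]
      by_cases hp : p x = true
      · have hmem : x ∈ ds.filter p := List.mem_filter.mpr ⟨hcov x List.mem_cons_self hp, hp⟩
        have h1 : (ds.filter p).count x = 1 :=
          List.count_eq_one_of_mem (hnd.filter p) hmem
        rw [h1]
        simp [hp]
      · have hnm : x ∉ ds.filter p := fun h => hp (List.mem_filter.mp h).2
        rw [List.count_eq_zero_of_not_mem hnm]
        simp [hp]

lemma pvLess_getD (cs : List Char) (c : Char) (hc : c ∈ cs) :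
    (pvLess cs).getD c 0 = (cs.countP (fun x => decide (x < c)) : Int) := by
  have hcnt : pvCnt cs = PySem.Dict.counter cs :=
    PySem.Dict.foldl_insert_getD_add_one_eq_counter cs
  unfold pvLess
  rw [hcnt, PySem.Dict.keys_counter, PySem.Dict.items_counter]
  set s := PySem.Set.ofList cs with hs
  set S : Char → Int := fun c =>
    (((s.map (fun k => (k, (List.count k cs : Int)))).filter (fun p => decide (p.1 < c))).map
      (fun p => p.2)).sum with hS
  have hitems :
      (s.foldl (fun d c => d.insert c (S c)) PySem.Dict.empty).items
        = s.map (fun k => (k, S k)) := by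
    have := PySem.Dict.items_foldl_insert_fresh (l := s) (k := fun k => k) (v := S)
      (d := PySem.Dict.empty) (by intro a _; simp) (by simp only [List.map_id']; exact PySem.Set.nodup_ofList cs)
    simpa using this
  have hkeysnd : (s.foldl (fun d c => d.insert c (S c)) PySem.Dict.empty).keys.Nodup := by
    apply PySem.Dict.nodup_keys_foldl_insert
    simp
  have hmem : (c, S c) ∈ (s.foldl (fun d c => d.insert c (S c)) PySem.Dict.empty).items := by
    rw [hitems]
    exact List.mem_map.mpr ⟨c, (PySem.Set.mem_ofList cs c).mpr hc, rfl⟩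
  rw [PySem.Dict.getD_of_mem_items _ hmem hkeysnd]
  rw [hS]
  simp only [List.filter_map, List.map_map]
  have hsc : ((s.filter (fun k => decide (k < c))).map (fun k => (List.count k cs : Int))).sum
      = (cs.countP (fun x => decide (x < c)) : Int) := by
    apply sum_count _ _ (PySem.Set.nodup_ofList cs)
    intro x hx _
    exact (PySem.Set.mem_ofList cs x).mpr hx
  simpa [Function.comp] using hsc

lemma point_eq (cs q t : List Char) (c : Char) (h : cs = q ++ c :: t) :
    (((PySem.List.index? (PySem.List.sorted cs (fun x => x)) c).getD 0 : Nat) : Int)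
      + ((PySem.Chars.count (PySem.List.slice cs none (some (q.length : Int))) [c] : Nat) : Int)
    = (pvLess cs).getD c 0
      + ((q.foldl (fun d x => d.insert x (d.getD x 0 + 1)) PySem.Dict.empty).getD c 0) := by
  have hc : c ∈ cs := by rw [h]; exact List.mem_append_right _ List.mem_cons_self
  have hseen : (q.foldl (fun d x => d.insert x (d.getD x 0 + 1)) PySem.Dict.empty).getD c 0
      = (q.count c : Int) := by
    rw [PySem.Dict.getD_foldl_insert_add_one]
    simp
  have hslice : PySem.List.slice cs none (some (q.length : Int)) = q := by
    rw [PySem.List.slice_to cs (by positivity), h, Int.toNat_natCast, List.take_left]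
  have hidx : PySem.List.index? (PySem.List.sorted cs (fun x => x)) c
      = some ((PySem.List.sorted cs (fun x => x)).countP (fun x => decide (x < c))) := by
    apply index?_sorted_eq_countP
    · simpa using PySem.List.sorted_pairwise cs (fun x => x)
    · exact (PySem.List.mem_sorted cs (fun x => x) false c).mpr hc
  rw [hidx, hslice, hseen, count_singleton,
      (PySem.List.sorted_perm cs (fun x => x) false).countP_eq,
      pvLess_getD cs c hc]
  simp

lemma loop_eq (cs : List Char) :
    ∀ (t q acc : List Char), cs = q ++ t →
      (t.foldl (fun (st : List Char × Int) lit =>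
          (st.1 ++ (PySem.Int.toStr
              ((((PySem.List.index? (PySem.List.sorted cs (fun x => x)) lit).getD 0 : Nat) : Int)
                + ((PySem.Chars.count (PySem.List.slice cs none (some st.2)) [lit] : Nat) : Int))).toList,
           st.2 + 1)) (acc, (q.length : Int))).1
      = (t.foldl (fun (st : PySem.Dict Char Int × List Char) c =>
            (st.1.insert c (st.1.getD c 0 + 1),
             st.2 ++ (PySem.Int.toStr ((pvLess cs).getD c 0 + st.1.getD c 0)).toList))
          (q.foldl (fun d x => d.insert x (d.getD x 0 + 1)) PySem.Dict.empty, acc)).2 := by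
  intro t
  induction t with
  | nil => intro q acc _; simp
  | cons c t ih =>
      intro q acc h
      simp only [List.foldl_cons]
      rw [point_eq cs q t c h]
      have hq1 : (q.length : Int) + 1 = (((q ++ [c]).length : Nat) : Int) := by
        simp
      rw [hq1]
      have H := ih (q ++ [c])
        (acc ++ (PySem.Int.toStr ((pvLess cs).getD c 0 +
          (q.foldl (fun d x => d.insert x (d.getD x 0 + 1)) PySem.Dict.empty).getD c 0)).toList)
        (by simpa using h)
      simp only [List.foldl_append, List.foldl_cons, List.foldl_nil] at H
      exact H

-- ===== VERDICT (by name: the statement is the Claim_ definition above) =====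
theorem zamiana_klucza_spec : Claim_equal_zamiana_klucza := by
  intro klucz _
  unfold Spec_zamiana_klucza zamiana_klucza zamiana_klucza_alt
  apply congrArg String.ofList
  have H := loop_eq klucz.toList klucz.toList [] [] rfl
  simpa using H
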